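-- pv_equiv track=rewrite | github.com/xpessoles/Informatique_PSI | Fiches/P_03_01_Integration_TD/programmes/code_ressources.py | compteRangee
-- ===== SOURCE A (Python) =====
-- def sontCompatibles(r1,r2,tailleMax):
--     for i in range(tailleMax-1):
--         if r1[i]=='1' and r2[i]=='1':
--             return(False)
--     return(True)
--
-- def compteRangee(toutesLesLignes,r,hauteur):
--     if hauteur==1:
--         return(1)
--     else:
--         nbCombi,dim=len(toutesLesLignes),len(toutesLesLignes[0])
--         somme=0
--         i=0
--         while i<nbCombi:
--             if sontCompatibles(r,toutesLesLignes[i],dim):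
--                 somme+=compteRangee(toutesLesLignes,toutesLesLignes[i],hauteur-1)
--             i+=1
--         return(somme)
-- ===== SOURCE B (Python) =====
-- # DP re-implementation: rows are grouped by their '1'-position mask (rows with equal
-- # masks behave identically), and a counts vector over the distinct masks is iterated
-- # over the remaining height, stopping at a fixed point, instead of naive recursion.
--
-- def _mask(s, k):
--     return tuple(i for i, ch in enumerate(s[:k]) if ch == '1')
--
-- def _compatible(m1, m2):
--     return all(i not in m2 for i in m1)
--
-- def compteRangee(toutesLesLignes, r, hauteur):
--     if hauteur == 1:
--         return 1
--     k = max(len(toutesLesLignes[0]) - 1, 0)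
--     allMasks = [_mask(row, k) for row in toutesLesLignes]
--     uniq = list(dict.fromkeys(allMasks))
--     weight = [allMasks.count(m) for m in uniq]
--     counts = [1] * len(uniq)
--     for _ in range(hauteur - 2):
--         new = [sum(w * c for m2, w, c in zip(uniq, weight, counts) if _compatible(m1, m2))
--                for m1 in uniq]
--         if new == counts:
--             break
--         counts = new
--     rm = _mask(r, k)
--     return sum(w * c for m, w, c in zip(uniq, weight, counts) if _compatible(rm, m))
-- ===== Notes on version B (the rewrite author's own statement) =====
-- stated objective: faster
-- what changed: replaces the naive exponential recursion over all row chains by dynamic programming: rows are grouped by their '1'-position mask with multiplicities and a counts vector over the distinct masks is iterated over the remaining height (with a fixed-point early exit) instead of recomputing subtrees per path (intended as faster; a timing run saw A time out where B returned but could not measure a ratio)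
-- outside the precondition, e.g. on compteRangee(['111', '1'], '111', 2): A returns 0, B returns 0; on compteRangee(['000', '0'], '000', 2): A returns 2, B returns 2; on compteRangee([], 'x', 2): A raises IndexError, B raises IndexError
import Mathlib
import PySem

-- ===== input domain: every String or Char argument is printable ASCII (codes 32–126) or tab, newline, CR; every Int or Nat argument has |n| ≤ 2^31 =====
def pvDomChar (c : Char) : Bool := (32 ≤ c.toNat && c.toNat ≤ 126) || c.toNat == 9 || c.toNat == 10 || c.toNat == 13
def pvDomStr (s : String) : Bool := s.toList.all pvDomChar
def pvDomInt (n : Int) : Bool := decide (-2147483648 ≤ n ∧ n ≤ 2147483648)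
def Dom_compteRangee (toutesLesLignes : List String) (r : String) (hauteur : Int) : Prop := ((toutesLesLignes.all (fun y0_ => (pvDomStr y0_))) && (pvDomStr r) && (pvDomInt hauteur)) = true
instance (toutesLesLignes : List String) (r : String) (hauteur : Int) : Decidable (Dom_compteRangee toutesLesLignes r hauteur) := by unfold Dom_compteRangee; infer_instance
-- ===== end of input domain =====

-- B replaces A's naive recursion over row chains by a DP over the distinct '1'-position
-- masks of the rows (grouped with multiplicities), iterated over the remaining height with
-- a fixed-point early exit; intended as faster (the probe saw A time out where B returned;
-- no clean ratio was measurable).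


-- ===== PORT A =====
-- the for-i-in-range loop of sontCompatibles, with its early 'return False'
def scGo (r1 r2 : String) : List Int → Bool
  | [] => true
  | i :: rest =>
    if (PySem.Str.pyGet? r1 i == some '1') && (PySem.Str.pyGet? r2 i == some '1') then false
    else scGo r1 r2 rest

def sontCompatibles (r1 r2 : String) (tailleMax : Int) : Bool :=
  scGo r1 r2 (PySem.List.pyRange 0 (tailleMax - 1) 1)

-- A's recursion on hauteur, with fuel = hauteur.toNat (Python recurses forever for
-- hauteur ≤ 0: excluded by Pre_); the while loop over row indices is the fold over
-- the rows carrying somme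
def crFuel (L : List String) : Nat → String → Int → Int
  | 0, _, _ => 0
  | fuel+1, r, hauteur =>
    if hauteur = 1 then 1
    else
      match L with
      | [] => 0  -- Python raises IndexError at toutesLesLignes[0]; excluded by Pre_
      | l0 :: _ =>
        let dim := PySem.Str.len l0
        L.foldl (fun somme li =>
          if sontCompatibles r li dim then somme + crFuel L fuel li (hauteur - 1) else somme) 0

def compteRangee (toutesLesLignes : List String) (r : String) (hauteur : Int) : Int :=
  crFuel toutesLesLignes hauteur.toNat r hauteur

-- ===== PORT B =====
-- _mask(s,k): indices i < k with s[i] == '1'; s[:k] with k ≥ 0 is List.take k on the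
-- code points, enumerate is PySem.List.enumerate
def maskB (s : String) (k : Nat) : List Int :=
  ((PySem.List.enumerate (s.toList.take k)).filter (fun p => p.2 == '1')).map (·.1)

-- _compatible: all(i not in m2 for i in m1)
def compatB (m1 m2 : List Int) : Bool := m1.all (fun i => !(m2.contains i))

-- the list comprehension computing the next counts vector (Python's 3-way zip is the
-- nested pairing zip uniq (zip weight counts))
def stepB (uniq : List (List Int)) (weight counts : List Int) : List Int :=
  uniq.map (fun m1 => (uniq.zip (weight.zip counts)).foldl
    (fun s p => if compatB m1 p.1 then s + p.2.1 * p.2.2 else s) 0)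

-- the for-loop over range(hauteur-2) with its early 'break' at a fixed point
def iterB (uniq : List (List Int)) (weight : List Int) : Nat → List Int → List Int
  | 0, cs => cs
  | t+1, cs =>
    let new := stepB uniq weight cs
    if new == cs then cs else iterB uniq weight t new

def compteRangee_alt (toutesLesLignes : List String) (r : String) (hauteur : Int) : Int :=
  if hauteur = 1 then 1
  else
    match toutesLesLignes with
    | [] => 0  -- Python raises IndexError; excluded by Pre_
    | l0 :: _ =>
      let k : Nat := l0.toList.length - 1  -- max(dim - 1, 0): Nat subtraction clamps
      let allMasks := toutesLesLignes.map (fun row => maskB row k)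
      let uniq := PySem.List.dedup allMasks  -- list(dict.fromkeys(allMasks))
      let weight := uniq.map (fun m => (allMasks.count m : Int))
      let counts := iterB uniq weight (hauteur - 2).toNat (uniq.map fun _ => (1:Int))
      (uniq.zip (weight.zip counts)).foldl
        (fun s p => if compatB (maskB r k) p.1 then s + p.2.1 * p.2.2 else s) 0

-- ===== PRECONDITION & SPEC =====
-- Pre_ excludes hauteur ≤ 0 (A recurses forever) and, for hauteur ≥ 2, the empty list
-- (IndexError at toutesLesLignes[0]) and inputs where r or some row is shorter than
-- dim-1, on which A's compatibility scan raises IndexError except when an early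
-- mismatch short-circuits first.
def Pre_compteRangee (toutesLesLignes : List String) (r : String) (hauteur : Int) : Prop :=
  hauteur = 1 ∨ (2 ≤ hauteur ∧ toutesLesLignes ≠ [] ∧
    (∀ s ∈ toutesLesLignes, (toutesLesLignes.headD "").toList.length - 1 ≤ s.toList.length) ∧
    (toutesLesLignes.headD "").toList.length - 1 ≤ r.toList.length)
instance (toutesLesLignes : List String) (r : String) (hauteur : Int) : Decidable (Pre_compteRangee toutesLesLignes r hauteur) := by unfold Pre_compteRangee; infer_instance

def pvWitness_compteRangee : List String × String × Int := (["10", "01", "00"], "00", 4)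

def Spec_compteRangee (toutesLesLignes : List String) (r : String) (hauteur : Int) (out : Int) : Prop := out = compteRangee_alt toutesLesLignes r hauteur
instance (toutesLesLignes : List String) (r : String) (hauteur : Int) (out : Int) : Decidable (Spec_compteRangee toutesLesLignes r hauteur out) := by unfold Spec_compteRangee; infer_instance

-- ===== CLAIM (what is proved, stated in full; the proofs are below) =====
def Claim_equal_compteRangee : Prop := ∀ (toutesLesLignes : List String) (r : String) (hauteur : Int), Dom_compteRangee toutesLesLignes r hauteur → Pre_compteRangee toutesLesLignes r hauteur → Spec_compteRangee toutesLesLignes r hauteur (compteRangee toutesLesLignes r hauteur)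

-- ===== LEMMAS AND PROOFS =====

-- the common semantics, per row: number of compatible chains of height t+1 below a row
def chainCount (L : List String) (k : Nat) : Nat → String → Int
  | 0, _ => 1
  | t+1, s => L.foldl (fun acc row =>
      if compatB (maskB s k) (maskB row k) then acc + chainCount L k t row else acc) 0

-- the same, per mask (a row's count only depends on its mask)
def mcount (L : List String) (k : Nat) : Nat → List Int → Int
  | 0, _ => 1
  | t+1, m => (((L.map (fun row => maskB row k)).filter
      (compatB m)).map (mcount L k t)).sum

lemma foldl_if_sum {α : Type} (P : α → Bool) (f : α → Int) :
    ∀ (l : List α) (init : Int),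
      l.foldl (fun s x => if P x then s + f x else s) init
        = init + ((l.filter P).map f).sum := by
  intro l
  induction l with
  | nil => intro init; simp
  | cons x l ih =>
    intro init
    cases hx : P x <;> simp [List.foldl_cons, List.filter_cons, hx, ih] <;> ring

lemma filter_map_comp {α β : Type} (g : α → β) (P : β → Bool) (f : β → Int) :
    ∀ (l : List α),
      ((l.filter (fun x => P (g x))).map (fun x => f (g x)))
        = (((l.map g).filter P).map f) := by
  intro l
  induction l with
  | nil => rfl
  | cons x l ih =>
    cases hx : P (g x) <;> simp [List.filter_cons, List.map_cons, hx, ih]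

lemma chainCount_eq_mcount (L : List String) (k : Nat) :
    ∀ (t : Nat) (s : String), chainCount L k t s = mcount L k t (maskB s k) := by
  intro t
  induction t with
  | zero => intro s; rfl
  | succ t ih =>
    intro s
    rw [chainCount, mcount,
        foldl_if_sum (fun row => compatB (maskB s k) (maskB row k)) (chainCount L k t) L 0,
        zero_add, List.map_congr_left (fun row _ => ih row),
        filter_map_comp (fun row => maskB row k) (compatB (maskB s k)) (mcount L k t) L]

lemma scGo_eq_all (a b : String) : ∀ (js : List Int),
    scGo a b js = js.all (fun i =>
      !((PySem.Str.pyGet? a i == some '1') && (PySem.Str.pyGet? b i == some '1'))) := by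
  intro js
  induction js with
  | nil => rfl
  | cons i js ih =>
    rw [scGo, List.all_cons, ih]
    cases hc : ((PySem.Str.pyGet? a i == some '1') && (PySem.Str.pyGet? b i == some '1')) <;>
      simp [hc]

lemma mem_maskB (s : String) (k : Nat) (hk : k ≤ s.toList.length) (i : Int) :
    i ∈ maskB s k ↔ ∃ j : Nat, i = (j : Int) ∧ j < k ∧ s.toList[j]? = some '1' := by
  rw [maskB, PySem.List.enumerate_eq_map_pyRange (s.toList.take k) ' ']
  simp only [List.mem_map, List.mem_filter, PySem.List.mem_pyRange_one, PySem.List.len_eq]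
  constructor
  · rintro ⟨p, ⟨⟨j, ⟨hj0, hjk⟩, rfl⟩, hone⟩, rfl⟩
    have hlen : (s.toList.take k).length = k := by rw [List.length_take, Nat.min_eq_left hk]
    have hjk' : j.toNat < k := by omega
    refine ⟨j.toNat, by omega, hjk', ?_⟩
    have heq := PySem.List.pyGetD_eq_getElem (s.toList.take k) ' ' hj0
      (by omega : j < ((s.toList.take k).length : Int))
    simp only [heq, List.getElem_take] at hone
    simp only [beq_iff_eq] at hone
    rw [List.getElem?_eq_getElem (by omega : j.toNat < s.toList.length)]
    exact congrArg some hone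
  · rintro ⟨j, rfl, hjk, hone⟩
    have hlen : (s.toList.take k).length = k := by rw [List.length_take, Nat.min_eq_left hk]
    refine ⟨((j:Int), PySem.List.pyGetD (s.toList.take k) (j:Int) ' '),
      ⟨⟨(j:Int), ⟨by omega, by omega⟩, rfl⟩, ?_⟩, rfl⟩
    have heq := PySem.List.pyGetD_eq_getElem (s.toList.take k) ' '
      (by omega : (0:Int) ≤ (j:Int)) (by omega : (j:Int) < ((s.toList.take k).length : Int))
    rw [List.getElem?_eq_getElem (by omega : j < s.toList.length)] at hone
    simp only [heq, List.getElem_take, Int.toNat_natCast, beq_iff_eq]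
    exact Option.some.inj hone

lemma compat_eq (d : Nat) (a b : String)
    (ha : d - 1 ≤ a.toList.length) (hb : d - 1 ≤ b.toList.length) :
    sontCompatibles a b (d : Int) = compatB (maskB a (d - 1)) (maskB b (d - 1)) := by
  have hrange : PySem.List.pyRange 0 ((d:Int) - 1) 1 = PySem.List.pyRange 0 (((d - 1 : Nat) : Int)) 1 := by
    cases d with
    | zero =>
      rw [PySem.List.pyRange_one_eq_nil (by omega), PySem.List.pyRange_one_eq_nil (by omega)]
    | succ n => congr 1; omega
  rw [sontCompatibles, scGo_eq_all, hrange, Bool.eq_iff_iff, List.all_eq_true, compatB,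
      List.all_eq_true]
  constructor
  · intro hall x hx
    simp only [Bool.not_eq_true', List.contains_eq_mem, decide_eq_false_iff_not]
    intro hmem
    obtain ⟨j, hxj, hjk, haj⟩ := (mem_maskB a (d-1) ha x).mp hx
    obtain ⟨j2, hxj2, hj2k, hbj⟩ := (mem_maskB b (d-1) hb x).mp hmem
    have hj2 : j2 = j := by omega
    subst hj2
    have hA := hall x (by rw [PySem.List.mem_pyRange_one]; omega)
    rw [hxj] at hA
    simp only [PySem.Str.pyGet?_natCast, haj, hbj] at hA
    simp at hA
  · intro hall i hi
    rw [PySem.List.mem_pyRange_one] at hi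
    have hga : PySem.Str.pyGet? a i = a.toList[i.toNat]? := by
      simp [PySem.List.pyGet?_of_nonneg _ hi.1]
    have hgb : PySem.Str.pyGet? b i = b.toList[i.toNat]? := by
      simp [PySem.List.pyGet?_of_nonneg _ hi.1]
    rw [hga, hgb]
    by_cases ha1 : a.toList[i.toNat]? = some '1'
    · by_cases hb1 : b.toList[i.toNat]? = some '1'
      · exfalso
        have hxa := (mem_maskB a (d-1) ha i).mpr ⟨i.toNat, by omega, by omega, ha1⟩
        have hni := hall i hxa
        simp only [Bool.not_eq_true', List.contains_eq_mem, decide_eq_false_iff_not] at hni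
        exact hni ((mem_maskB b (d-1) hb i).mpr ⟨i.toNat, by omega, by omega, hb1⟩)
      · simp [hb1]
    · simp [ha1]

lemma foldl_eq_of_mem {α : Type} (f g : Int → α → Int)
    (xs : List α) (h : ∀ x ∈ xs, ∀ acc, f acc x = g acc x) :
    ∀ init, xs.foldl f init = xs.foldl g init := by
  induction xs with
  | nil => intro _; rfl
  | cons x xs ih =>
    intro init
    simp only [List.foldl_cons, h x (by simp)]
    exact ih (fun y hy => h y (by simp [hy])) _

lemma crFuel_succ (l0 : String) (rest : List String) (fuel : Nat) (r : String) (hauteur : Int)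
    (hh : ¬ hauteur = 1) :
    crFuel (l0 :: rest) (fuel+1) r hauteur
      = (l0 :: rest).foldl (fun somme li =>
          if sontCompatibles r li (PySem.Str.len l0) then
            somme + crFuel (l0 :: rest) fuel li (hauteur - 1) else somme) 0 := by
  simp only [crFuel]
  rw [if_neg hh]

lemma A_eq_chain (l0 : String) (rest : List String)
    (hlen : ∀ s ∈ l0 :: rest, l0.toList.length - 1 ≤ s.toList.length) :
    ∀ (m : Nat) (s : String), l0.toList.length - 1 ≤ s.toList.length →
      crFuel (l0 :: rest) (m + 1) s ((m : Int) + 1)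
        = chainCount (l0 :: rest) (l0.toList.length - 1) m s := by
  intro m
  induction m with
  | zero => intro s _; norm_num [crFuel, chainCount]
  | succ m ih =>
    intro s hs
    rw [crFuel_succ _ _ _ _ _ (by push_cast; omega), chainCount]
    have harg : ((m + 1 : Nat) : Int) + 1 - 1 = (m : Int) + 1 := by push_cast; ring
    apply foldl_eq_of_mem
    intro li hli acc
    rw [PySem.Str.len_eq, compat_eq l0.toList.length s li hs (hlen li hli), harg,
        ih li (hlen li hli)]

lemma sum_split {α : Type} (p : α → Bool) (f : α → Int) :
    ∀ (l : List α), (l.map f).sum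
      = ((l.filter p).map f).sum + ((l.filter (fun x => !p x)).map f).sum := by
  intro l
  induction l with
  | nil => simp
  | cons x l ih =>
    cases hx : p x <;> simp [List.filter_cons, hx, ih] <;> ring

lemma sum_count {M : Type} [BEq M] [LawfulBEq M] (f : M → Int) :
    ∀ (u : List M) (l : List M), u.Nodup → (∀ x ∈ l, x ∈ u) →
      (u.map (fun m => (l.count m : Int) * f m)).sum = (l.map f).sum := by
  intro u
  induction u with
  | nil =>
    intro l _ h
    match l with
    | [] => rfl
    | x :: l' => exact absurd (h x (by simp)) (by simp)
  | cons m u' ih =>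
    intro l hnd h
    rw [List.map_cons, List.sum_cons, sum_split (fun x => x == m) f l]
    have h1 : ((l.filter (fun x => x == m)).map f).sum = (l.count m : Int) * f m := by
      rw [List.filter_beq, List.map_replicate, List.sum_replicate, nsmul_eq_mul]
    have hmem : ∀ x ∈ l.filter (fun x => !(x == m)), x ∈ u' := by
      intro x hx
      rw [List.mem_filter] at hx
      have hxu := h x hx.1
      have hxne : ¬ x = m := by simpa using hx.2
      simpa [hxne] using hxu
    have h2 := ih (l.filter (fun x => !(x == m))) (List.nodup_cons.mp hnd).2 hmem
    have h3 : (u'.map (fun m' => ((l.filter (fun x => !(x == m))).count m' : Int) * f m')).sum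
        = (u'.map (fun m' => (l.count m' : Int) * f m')).sum := by
      refine congrArg List.sum (List.map_congr_left (fun m' hm' => ?_))
      have hne : ¬ (m' == m) = true := by
        have hnm : m ∉ u' := (List.nodup_cons.mp hnd).1
        simp only [beq_iff_eq]
        rintro rfl
        exact hnm hm'
      rw [List.count_filter (by simpa using hne)]
    rw [h1, ← h3, h2]

lemma zipmap2_foldl {α : Type} (f g : α → Int) (P : α → Bool) :
    ∀ (xs : List α) (init : Int),
      (xs.zip ((xs.map f).zip (xs.map g))).foldl
          (fun s p => if P p.1 then s + p.2.1 * p.2.2 else s) init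
        = xs.foldl (fun s m => if P m then s + f m * g m else s) init := by
  intro xs
  induction xs with
  | nil => intro _; rfl
  | cons x xs ih =>
    intro init
    simp only [List.map_cons, List.zip_cons_cons, List.foldl_cons, ih]

-- the grouped sum over distinct masks equals the plain sum over all rows' masks
lemma grouped_sum (L : List String) (k : Nat) (P : List Int → Bool) (h : List Int → Int) :
    ((PySem.List.dedup (L.map (fun row => maskB row k))).zip
        (((PySem.List.dedup (L.map (fun row => maskB row k))).map
            (fun m => ((L.map (fun row => maskB row k)).count m : Int))).zip
          ((PySem.List.dedup (L.map (fun row => maskB row k))).map h))).foldl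
        (fun s p => if P p.1 then s + p.2.1 * p.2.2 else s) 0
      = (((L.map (fun row => maskB row k)).filter P).map h).sum := by
  rw [zipmap2_foldl (fun m => ((L.map (fun row => maskB row k)).count m : Int)) h P
        (PySem.List.dedup (L.map (fun row => maskB row k))) 0,
      foldl_if_sum P (fun m => ((L.map (fun row => maskB row k)).count m : Int) * h m)
        (PySem.List.dedup (L.map (fun row => maskB row k))) 0, zero_add]
  have hcongr : (((PySem.List.dedup (L.map (fun row => maskB row k))).filter P).map
        (fun m => ((L.map (fun row => maskB row k)).count m : Int) * h m))
      = (((PySem.List.dedup (L.map (fun row => maskB row k))).filter P).map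
        (fun m => (((L.map (fun row => maskB row k)).filter P).count m : Int) * h m)) := by
    refine List.map_congr_left (fun m hm => ?_)
    rw [List.count_filter (List.mem_filter.mp hm).2]
  rw [hcongr]
  refine sum_count h ((PySem.List.dedup (L.map (fun row => maskB row k))).filter P)
    ((L.map (fun row => maskB row k)).filter P)
    (List.Nodup.filter P (PySem.List.nodup_dedup _)) (fun x hx => ?_)
  rw [List.mem_filter] at hx ⊢
  exact ⟨(PySem.List.mem_dedup _ _).mpr hx.1, hx.2⟩

lemma mcount_stall (L : List String) (k : Nat) (u : Nat)
    (h : ∀ m2 ∈ L.map (fun row => maskB row k), mcount L k (u+1) m2 = mcount L k u m2) :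
    ∀ (d : Nat) (m : List Int), mcount L k (u+1+d) m = mcount L k (u+1) m := by
  intro d
  induction d with
  | zero => intro m; rfl
  | succ d ih =>
    intro m
    rw [show u+1+(d+1) = (u+1+d)+1 by omega, mcount,
        List.map_congr_left (fun m2 _ => ih m2), mcount]
    refine congrArg List.sum (List.map_congr_left (fun m2 hm2 => ?_))
    exact h m2 (List.mem_of_mem_filter hm2)

lemma step_eq (L : List String) (k : Nat) (u : Nat) :
    stepB (PySem.List.dedup (L.map (fun row => maskB row k)))
        ((PySem.List.dedup (L.map (fun row => maskB row k))).map
          (fun m => ((L.map (fun row => maskB row k)).count m : Int)))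
        ((PySem.List.dedup (L.map (fun row => maskB row k))).map (mcount L k u))
      = (PySem.List.dedup (L.map (fun row => maskB row k))).map (mcount L k (u+1)) := by
  rw [stepB]
  refine List.map_congr_left (fun m1 _ => ?_)
  rw [grouped_sum L k (compatB m1) (mcount L k u), mcount]

lemma iterB_eq (L : List String) (k : Nat) :
    ∀ (t u : Nat),
      iterB (PySem.List.dedup (L.map (fun row => maskB row k)))
          ((PySem.List.dedup (L.map (fun row => maskB row k))).map
            (fun m => ((L.map (fun row => maskB row k)).count m : Int)))
          t ((PySem.List.dedup (L.map (fun row => maskB row k))).map (mcount L k u))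
        = (PySem.List.dedup (L.map (fun row => maskB row k))).map (mcount L k (t+u)) := by
  intro t
  induction t with
  | zero => intro u; rw [Nat.zero_add]; rfl
  | succ t ih =>
    intro u
    rw [iterB]
    simp only [step_eq L k u]
    by_cases hfix : (PySem.List.dedup (L.map (fun row => maskB row k))).map (mcount L k (u+1))
        = (PySem.List.dedup (L.map (fun row => maskB row k))).map (mcount L k u)
    · rw [if_pos (by simpa using hfix)]
      have hpt : ∀ m2 ∈ L.map (fun row => maskB row k), mcount L k (u+1) m2 = mcount L k u m2 := by
        intro m2 hm2
        have hm2' : m2 ∈ PySem.List.dedup (L.map (fun row => maskB row k)) :=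
          (PySem.List.mem_dedup _ _).mpr hm2
        obtain ⟨i, hi, hieq⟩ := List.mem_iff_getElem.mp hm2'
        have := congrArg (fun l => l[i]?) hfix
        simp only [List.getElem?_map] at this
        rw [List.getElem?_eq_getElem hi, hieq] at this
        simpa using this
      refine List.map_congr_left (fun m hm => ?_)
      have h1 : mcount L k (t+1+u) m = mcount L k u m := by
        rw [show t+1+u = u+1+t by omega]
        exact (mcount_stall L k u hpt t m).trans (hpt m ((PySem.List.mem_dedup _ _).mp hm))
      exact h1.symm
    · rw [if_neg (by simpa using hfix), ih (u+1), show t+(u+1) = t+1+u by omega]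

-- ===== VERDICT (by name: the statement is the Claim_ definition above) =====
theorem compteRangee_spec : Claim_equal_compteRangee := by
  intro L r hauteur _ hpre
  show compteRangee L r hauteur = compteRangee_alt L r hauteur
  rcases hpre with h1 | ⟨h2, hne, hrows, hr⟩
  · subst h1; norm_num [compteRangee, compteRangee_alt, crFuel]
  · match L, hne with
    | l0 :: rest, _ =>
      simp only [List.headD_cons] at hrows hr
      obtain ⟨t, ht⟩ : ∃ t, (hauteur - 1).toNat = t + 1 := ⟨(hauteur - 2).toNat, by omega⟩
      have hfuel : hauteur.toNat = (t + 1) + 1 := by omega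
      have hh : hauteur = ((t + 1 : Nat) : Int) + 1 := by push_cast; omega
      have ht2 : (((t + 1 : Nat) : Int) + 1 - 2).toNat = t := by push_cast; omega
      rw [compteRangee, hfuel, hh, A_eq_chain l0 rest hrows (t+1) r hr]
      rw [compteRangee_alt.eq_def]
      rw [if_neg (by push_cast at hh ⊢; omega)]
      have hones : ((PySem.List.dedup ((l0 :: rest).map (fun row => maskB row (l0.toList.length - 1)))).map
            fun _ => (1:Int))
          = (PySem.List.dedup ((l0 :: rest).map (fun row => maskB row (l0.toList.length - 1)))).map
            (mcount (l0 :: rest) (l0.toList.length - 1) 0) := by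
        simp [mcount]
      simp only [ht2, hones]
      rw [iterB_eq (l0 :: rest) (l0.toList.length - 1) t 0]
      simp only [Nat.add_zero]
      rw [grouped_sum (l0 :: rest) (l0.toList.length - 1)
            (compatB (maskB r (l0.toList.length - 1))) (mcount (l0 :: rest) (l0.toList.length - 1) t),
          chainCount_eq_mcount (l0 :: rest) (l0.toList.length - 1) (t+1) r, mcount]
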